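-- pv_equiv track=rewrite | github.com/sreeramaraju/advent2018 | day2/day2.py | count2sAnd3s
-- ===== SOURCE A (Python) =====
-- from collections import defaultdict
--
-- def count2sAnd3s(code):
--     cnt2, cnt3 = 0, 0
--     c_d = defaultdict(int)
--     for c in code:
--         c_d[c] += 1
--     vals = c_d.values()
--     if 2 in vals:
--         cnt2 = 1
--     if 3 in vals:
--         cnt3 = 1
--     return cnt2, cnt3
-- ===== SOURCE B (Python) =====
-- def count2sAnd3s(code):
--     # Sort the characters so equal ones become contiguous, then scan the runs:
--     # a run of length 2 witnesses a character appearing exactly twice, etc.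
--     s = sorted(code)
--     has2 = False
--     has3 = False
--     i = 0
--     n = len(s)
--     while i < n:
--         j = i
--         while j < n and s[j] == s[i]:
--             j += 1
--         run = j - i
--         if run == 2:
--             has2 = True
--         if run == 3:
--             has3 = True
--         i = j
--     return (1 if has2 else 0, 1 if has3 else 0)
-- ===== Notes on version B (the rewrite author's own statement) =====
-- stated objective: alternative
-- what changed: Replaces the hash-map frequency count with a sort-then-scan: sort the characters so equal ones are contiguous, then walk the sorted list measuring run lengths and flag runs of length exactly 2 and 3.
import Mathlib
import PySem

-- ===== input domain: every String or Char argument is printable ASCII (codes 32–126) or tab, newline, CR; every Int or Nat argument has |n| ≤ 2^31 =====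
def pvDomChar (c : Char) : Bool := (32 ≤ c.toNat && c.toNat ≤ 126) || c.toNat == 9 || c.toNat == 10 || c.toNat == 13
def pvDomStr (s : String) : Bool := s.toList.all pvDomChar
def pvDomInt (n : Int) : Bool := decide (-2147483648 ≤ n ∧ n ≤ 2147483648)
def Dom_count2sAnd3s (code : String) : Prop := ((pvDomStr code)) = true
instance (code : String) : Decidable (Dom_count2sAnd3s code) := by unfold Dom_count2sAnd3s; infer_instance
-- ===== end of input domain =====

-- B replaces A's hash-map frequency count by sort-then-scan: sort the characters,
-- then walk the runs of equal characters, flagging run lengths 2 and 3 (alternative).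

-- ===== PORT A =====
def count2sAnd3s (code : String) : Int × Int :=
  -- c_d = defaultdict(int); for c in code: c_d[c] += 1
  let c_d : PySem.Dict Char Int :=
    code.toList.foldl (fun d c => d.modify c 0 (· + 1)) PySem.Dict.empty
  let vals := c_d.values
  let cnt2 : Int := if (2 : Int) ∈ vals then 1 else 0
  let cnt3 : Int := if (3 : Int) ∈ vals then 1 else 0
  (cnt2, cnt3)

-- ===== PORT B =====
-- the outer/inner while loops of Source B: consume one run of equal characters per step
def runScan : List Char → Bool → Bool → Bool × Bool
  | [], h2, h3 => (h2, h3)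
  | c :: rest, h2, h3 =>
      let run := 1 + (rest.takeWhile (· == c)).length
      runScan (rest.dropWhile (· == c)) (h2 || (run == 2)) (h3 || (run == 3))
termination_by s _ _ => s.length
decreasing_by
  simpa using Nat.lt_succ_of_le (List.length_dropWhile_le _ _)

def count2sAnd3s_alt (code : String) : Int × Int :=
  let s := PySem.List.sorted code.toList (fun x => x) false
  let r := runScan s false false
  (if r.1 then 1 else 0, if r.2 then 1 else 0)

-- ===== PRECONDITION & SPEC =====
def Spec_count2sAnd3s (code : String) (out : Int × Int) : Prop := out = count2sAnd3s_alt code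
instance (code : String) (out : Int × Int) : Decidable (Spec_count2sAnd3s code out) := by unfold Spec_count2sAnd3s; infer_instance

-- ===== CLAIM (what is proved, stated in full; the proofs are below) =====
def Claim_equal_count2sAnd3s : Prop := ∀ (code : String), Dom_count2sAnd3s code → Spec_count2sAnd3s code (count2sAnd3s code)

-- ===== LEMMAS AND PROOFS =====

-- A's loop-built dict is Counter(code); its values are the per-distinct counts.
theorem count2sAnd3s_values_eq (code : String) :
    (code.toList.foldl (fun d c => d.modify c 0 (· + 1)) (PySem.Dict.empty : PySem.Dict Char Int)).values
      = (PySem.Set.ofList code.toList).map (fun c => (code.toList.count c : Int)) := by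
  rw [← PySem.Dict.counter_eq_foldl]
  show (PySem.Dict.counter code.toList).items.map (·.2) = _
  rw [PySem.Dict.items_counter]
  simp [List.map_map, Function.comp]

-- in a nondecreasing list, the head value does not reappear after its leading run
theorem not_mem_dropWhile_aux (c : Char) : ∀ (l : List Char),
    (∀ x ∈ l, c ≤ x) → l.Pairwise (· ≤ ·) → c ∉ l.dropWhile (· == c)
  | [], _, _ => by simp
  | a :: rs, hle, hp => by
    by_cases hac : a = c
    · rw [List.dropWhile_cons_of_pos (by simp [hac])]
      exact not_mem_dropWhile_aux c rs
        (fun x hx => hle x (List.mem_cons_of_mem _ hx)) (List.pairwise_cons.1 hp).2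
    · rw [List.dropWhile_cons_of_neg (by simp [hac])]
      intro hmem
      have hca : c < a := lt_of_le_of_ne (hle a (by simp)) (Ne.symm hac)
      rcases List.mem_cons.1 hmem with h | h
      · exact hac h.symm
      · exact absurd (lt_of_lt_of_le hca ((List.pairwise_cons.1 hp).1 c h)) (lt_irrefl c)

theorem head_not_mem_dropWhile (c : Char) (rest : List Char)
    (hs : (c :: rest).Pairwise (· ≤ ·)) : c ∉ rest.dropWhile (· == c) :=
  not_mem_dropWhile_aux c rest (List.pairwise_cons.1 hs).1 (List.pairwise_cons.1 hs).2

-- run-length scan of a sorted list = "some character occurs exactly k times"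
theorem runScan_eq (s : List Char) (hs : s.Pairwise (· ≤ ·)) (h2 h3 : Bool) :
    runScan s h2 h3 = (h2 || s.any (fun x => s.count x == 2),
                       h3 || s.any (fun x => s.count x == 3)) := by
  match s with
  | [] => simp [runScan]
  | c :: rest =>
    set t := rest.takeWhile (· == c) with ht
    set d := rest.dropWhile (· == c) with hdd
    have hsplit : rest = t ++ d := (List.takeWhile_append_dropWhile).symm
    have hmt : ∀ x ∈ t, x = c := fun x hx => by
      simpa using List.mem_takeWhile_imp hx
    have hcd : c ∉ d := head_not_mem_dropWhile c rest hs
    have hpd : d.Pairwise ((· ≤ ·) : Char → Char → Prop) :=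
      List.Pairwise.sublist (List.dropWhile_sublist _) (List.pairwise_cons.1 hs).2
    have hlen : d.length < (c :: rest).length :=
      Nat.lt_succ_of_le (List.length_dropWhile_le _ _)
    have ih := runScan_eq d hpd (h2 || (1 + t.length == 2)) (h3 || (1 + t.length == 3))
    have hcount_c : (c :: rest).count c = 1 + t.length := by
      rw [hsplit]
      have h1 : t.count c = t.length := List.count_eq_length.2 (fun b hb => ((hmt b hb).symm ▸ rfl))
      have h2 : d.count c = 0 := List.count_eq_zero.2 hcd
      simp [List.count_append, h1, h2]
      omega
    have hcount_ne : ∀ x, x ≠ c → (c :: rest).count x = d.count x := by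
      intro x hx
      rw [hsplit]
      have h1 : t.count x = 0 := List.count_eq_zero.2 (fun hm => hx (hmt x hm))
      simp [List.count_append, h1, Ne.symm hx]
    have hany : ∀ k : Nat, ((1 + t.length == k) || d.any (fun x => d.count x == k))
        = (c :: rest).any (fun x => (c :: rest).count x == k) := by
      intro k
      rw [Bool.eq_iff_iff]
      simp only [Bool.or_eq_true, List.any_eq_true, beq_iff_eq]
      constructor
      · rintro (h | ⟨x, hxd, hxc⟩)
        · exact ⟨c, by simp, by rw [hcount_c]; omega⟩
        · refine ⟨x, ?_, ?_⟩
          · exact List.mem_cons_of_mem _ ((List.dropWhile_sublist _).mem hxd)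
          · have hx : x ≠ c := fun h => hcd (h ▸ hxd)
            rw [hcount_ne x hx]; exact hxc
      · rintro ⟨x, hxs, hxk⟩
        by_cases hx : x = c
        · subst hx; left; rw [hcount_c] at hxk; omega
        · right
          rcases List.mem_cons.1 hxs with h | h
          · exact absurd h hx
          · rw [hsplit] at h
            rcases List.mem_append.1 h with h | h
            · exact absurd (hmt x h) hx
            · exact ⟨x, h, by rw [← hcount_ne x hx]; exact hxk⟩
    rw [runScan, ih]
    rw [Bool.or_assoc, Bool.or_assoc, hany 2, hany 3]
termination_by s.length
decreasing_by
  simpa using Nat.lt_succ_of_le (List.length_dropWhile_le (fun x => x == c) rest)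

-- membership of k among A's values = the any-count test on the raw character list
theorem mem_values_iff (l : List Char) (k : Nat) :
    ((k : Int) ∈ (PySem.Set.ofList l).map (fun c => (l.count c : Int)))
      ↔ l.any (fun x => l.count x == k) = true := by
  simp only [List.mem_map, List.any_eq_true, beq_iff_eq]
  constructor
  · rintro ⟨c, hc, hk⟩
    exact ⟨c, (PySem.Set.mem_ofList _ _).1 hc, by exact_mod_cast hk⟩
  · rintro ⟨c, hc, hk⟩
    exact ⟨c, (PySem.Set.mem_ofList _ _).2 hc, by exact_mod_cast hk⟩

-- the any-count test is invariant under sorting (a permutation)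
theorem any_count_sorted (l : List Char) (k : Nat) :
    (PySem.List.sorted l (fun x => x) false).any
        (fun x => (PySem.List.sorted l (fun x => x) false).count x == k)
      = l.any (fun x => l.count x == k) := by
  have hperm := PySem.List.sorted_perm l (fun x => x) false
  rw [Bool.eq_iff_iff]
  simp only [List.any_eq_true]
  constructor
  · rintro ⟨x, hx, hk⟩
    exact ⟨x, hperm.mem_iff.1 hx, by rwa [hperm.count_eq] at hk⟩
  · rintro ⟨x, hx, hk⟩
    exact ⟨x, hperm.mem_iff.2 hx, by rwa [hperm.count_eq]⟩

-- ===== VERDICT (by name: the statement is the Claim_ definition above) =====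
theorem count2sAnd3s_spec : Claim_equal_count2sAnd3s := by
  intro code _
  show count2sAnd3s code = count2sAnd3s_alt code
  have hpw : (PySem.List.sorted code.toList (fun x => x) false).Pairwise
      ((· ≤ ·) : Char → Char → Prop) := by
    simpa using PySem.List.sorted_pairwise code.toList (fun x => x)
  have h2 := mem_values_iff code.toList 2
  have h3 := mem_values_iff code.toList 3
  simp only [Nat.cast_ofNat] at h2 h3
  simp only [count2sAnd3s, count2sAnd3s_alt, count2sAnd3s_values_eq,
    runScan_eq _ hpw, Bool.false_or, any_count_sorted, h2, h3]
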